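-- pv_equiv track=rewrite | github.com/irutupatel/Sequential-Contiguous-Pattern-Mining | SeqConPatMin.py | createSpadeDatabase
-- ===== SOURCE A (Python) =====
-- def createSpadeDatabase(textCorpus):
--     """
--     :param textCorpus:
--     :return: dataframeDictionary: {'1': {'10': 'the', '12': 'is', '1': 'good', '3': 'fish', '2': 'grilled', '4': 'sandwich', '7': 'fries', '6': 'french', '9': 'but', '8': ','}, '3': {'11': 'but', '10': ',', '3': 'fish', '2': 'grilled', '5': 'is', '4': 'sandwich', '6': 'the', '9': 'sandwich', '8': 'fish'}, '2': {'3': 'sandwich', '2': 'fish', '5': 'but', '4': ',', '7': 'french', '6': 'good', '8': 'fries'}, '4': {'1': 'A', '3': 'A', '2': 'B', '5': 'A', '4': 'B', '7': 'A', '6': 'B'}}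
--
--     """
--
--     # First create a minSup dictionary only for frequent items
--     minSupDictionary = dict()
--     for whichSID, line in enumerate(textCorpus):
--         words = line.split(" ")
--         for whichEID, word in enumerate(words):
--             if word not in minSupDictionary:
--                 minSupDictionary[word] = 1
--             else:
--                 minSupDictionary[word] += 1
--
--     # Create dataframe as SPADE algorithm, with frequent words; ie words of sup >= minsup
--     dataframeDictionary = dict()
--     for lineIndex, line in enumerate(textCorpus):
--         whichSID = str(lineIndex + 1)
--         words = line.split(" ")
--         for wordIndex, word in enumerate(words):
--             whichEID = str(wordIndex+1)
--             # Only considering frequent words; >= minsup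
--             if minSupDictionary[word] >= 2:
--                 if whichSID not in dataframeDictionary:
--                     dataframeDictionary[whichSID] = dict()
--                 dataframeDictionary[whichSID][whichEID] = word
--
--     return dataframeDictionary
-- ===== SOURCE B (Python) =====
-- def createSpadeDatabase(textCorpus):
--     # Vertical (SPADE-style id-list) algorithm: one pass records, per word, the
--     # id-list of integer (SID, EID) positions where it occurs; a word is
--     # frequent iff its id-list has length >= 2.  The nested dict is then
--     # reconstructed by scattering the frequent id-lists into per-SID integer
--     # buckets and emitting them in ascending numeric (SID, EID) order -- which
--     # is exactly the corpus order in which A inserts.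
--     idlists = {}
--     for sid, line in enumerate(textCorpus, 1):
--         for eid, word in enumerate(line.split(" "), 1):
--             idlists.setdefault(word, []).append((sid, eid))
--     buckets = {}
--     for word, occs in idlists.items():
--         if len(occs) >= 2:
--             for sid, eid in occs:
--                 buckets.setdefault(sid, {})[eid] = word
--     return {str(sid): {str(eid): buckets[sid][eid] for eid in sorted(buckets[sid])}
--             for sid in sorted(buckets)}
-- ===== Notes on version B (the rewrite author's own statement) =====
-- stated objective: alternative
-- what changed: A counts words in one corpus scan and then re-scans the corpus filtering words by count while inserting in corpus order; B builds a vertical SPADE-style inverted index (word -> id-list of integer (SID,EID) occurrences), declares a word frequent iff its id-list has length >= 2 (no separate counter), scatters the frequent id-lists word-by-word into per-SID integer buckets, and emits the buckets in ascending numeric (SID,EID) order, which provably coincides with A's corpus insertion order.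
import Mathlib
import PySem

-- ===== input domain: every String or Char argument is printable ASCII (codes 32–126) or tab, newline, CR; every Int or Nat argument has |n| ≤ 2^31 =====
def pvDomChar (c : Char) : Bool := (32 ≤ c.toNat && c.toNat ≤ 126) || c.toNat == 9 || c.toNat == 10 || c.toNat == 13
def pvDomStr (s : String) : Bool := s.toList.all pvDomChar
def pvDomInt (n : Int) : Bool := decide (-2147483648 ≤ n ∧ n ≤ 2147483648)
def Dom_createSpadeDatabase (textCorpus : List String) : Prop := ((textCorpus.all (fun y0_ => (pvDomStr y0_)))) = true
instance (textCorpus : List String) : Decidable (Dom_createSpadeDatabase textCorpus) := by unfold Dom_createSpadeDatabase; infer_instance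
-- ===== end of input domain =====

-- B replaces A's count-then-rescan scheme by a vertical SPADE-style inverted index (word -> id-list of
-- integer (SID,EID) occurrences): frequent = id-list length >= 2, and the nested dict is rebuilt from the
-- frequent id-lists via per-SID buckets emitted in ascending numeric key order (= A's insertion order).

-- shared helper: line.split(" ")  (separator is the non-empty literal " ", so split? is always some)
def pvWords (line : String) : List String := (PySem.Str.split? line " ").getD []

-- ===== PORT A =====
def createSpadeDatabase (textCorpus : List String) : List (String × List (String × String)) :=
  let minSup : PySem.Dict String Int :=
    (PySem.List.enumerate textCorpus).foldl (fun d p =>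
      (PySem.List.enumerate (pvWords p.2)).foldl (fun d q =>
        if d.contains q.2 = false then d.insert q.2 1
        else d.insert q.2 (d.getD q.2 0 + 1)) d) PySem.Dict.empty
  let df : PySem.Dict String (PySem.Dict String String) :=
    (PySem.List.enumerate textCorpus).foldl (fun df p =>
      let whichSID := PySem.Int.toStr (p.1 + 1)
      (PySem.List.enumerate (pvWords p.2)).foldl (fun df q =>
        let whichEID := PySem.Int.toStr (q.1 + 1)
        if minSup.getD q.2 0 ≥ 2 then
          -- dataframeDictionary[whichSID] = dict()  (only when the SID key is absent)
          let df' := if df.contains whichSID = false then df.insert whichSID PySem.Dict.empty else df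
          -- dataframeDictionary[whichSID][whichEID] = word : update of the inner dict in place
          df'.insert whichSID ((df'.getD whichSID PySem.Dict.empty).insert whichEID q.2)
        else df) df) PySem.Dict.empty
  df.items.map (fun kv => (kv.1, kv.2.items))

-- ===== PORT B =====
-- B-side helpers: the three stages of Source B (id-list pass, scatter pass, sorted emission)
-- idlists.setdefault(word, []).append((sid, eid))  =  d[word] = d.get(word, []) + [(sid, eid)]
def pvAltIdlists (textCorpus : List String) : PySem.Dict String (List (Int × Int)) :=
  (PySem.List.enumerate textCorpus 1).foldl (fun d p =>
    (PySem.List.enumerate (pvWords p.2) 1).foldl (fun d q =>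
      d.modify q.2 [] (· ++ [(p.1, q.1)])) d) PySem.Dict.empty

-- buckets.setdefault(sid, {})[eid] = word, for every id-list of length >= 2
def pvAltBuckets (textCorpus : List String) : PySem.Dict Int (PySem.Dict Int String) :=
  (pvAltIdlists textCorpus).items.foldl (fun b kv =>
    if 2 ≤ kv.2.length then
      kv.2.foldl (fun b o => b.insert o.1 ((b.getD o.1 PySem.Dict.empty).insert o.2 kv.1)) b
    else b) PySem.Dict.empty

-- the two dict comprehensions over DISTINCT sorted keys are the association lists they enumerate;
-- buckets[sid] / buckets[sid][eid] index keys that are always present, ported as getD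
def createSpadeDatabase_alt (textCorpus : List String) : List (String × List (String × String)) :=
  (PySem.List.sorted (pvAltBuckets textCorpus).keys (fun x => x) false).map (fun sid =>
    (PySem.Int.toStr sid,
      (PySem.List.sorted ((pvAltBuckets textCorpus).getD sid PySem.Dict.empty).keys (fun x => x) false).map
        (fun eid => (PySem.Int.toStr eid, ((pvAltBuckets textCorpus).getD sid PySem.Dict.empty).getD eid ""))))

-- ===== PRECONDITION & SPEC =====
def Spec_createSpadeDatabase (textCorpus : List String) (out : List (String × List (String × String))) : Prop := out = createSpadeDatabase_alt textCorpus
instance (textCorpus : List String) (out : List (String × List (String × String))) : Decidable (Spec_createSpadeDatabase textCorpus out) := by unfold Spec_createSpadeDatabase; infer_instance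

-- ===== CLAIM (what is proved, stated in full; the proofs are below) =====
def Claim_equal_createSpadeDatabase : Prop := ∀ (textCorpus : List String), Dom_createSpadeDatabase textCorpus → Spec_createSpadeDatabase textCorpus (createSpadeDatabase textCorpus)

-- ===== LEMMAS AND PROOFS =====

/- str(n) is injective for nonnegative n: first relate Nat.toDigits to Nat.digits. -/
def pvRep (n : Nat) : List Char := ((Nat.digits 10 n).map Nat.digitChar).reverse

theorem pvToDigitsCore_eq (f n : Nat) (acc : List Char) (h : n < f) :
    Nat.toDigitsCore 10 f n acc = (if n = 0 then ['0'] else pvRep n) ++ acc := by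
  induction f generalizing n acc with
  | zero => omega
  | succ f ih =>
    show (if n / 10 = 0 then (n % 10).digitChar :: acc
          else Nat.toDigitsCore 10 f (n / 10) ((n % 10).digitChar :: acc)) = _
    by_cases h0 : n / 10 = 0
    · rw [if_pos h0]
      rcases Nat.eq_zero_or_pos n with hn | hn
      · subst hn; norm_num [Nat.digitChar]
      · have hn10 : n < 10 := by omega
        rw [if_neg (by omega), pvRep, Nat.digits_def' (by norm_num : 1 < 10) hn,
            Nat.mod_eq_of_lt hn10, h0]
        simp
    · rw [if_neg h0]
      have hn : 0 < n := Nat.pos_of_ne_zero (fun hz => h0 (by simp [hz]))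
      have hlt : n / 10 < f := by
        have := Nat.div_lt_self hn (by norm_num : 1 < 10)
        omega
      rw [ih _ _ hlt, if_neg h0, if_neg (by omega), pvRep, pvRep,
          Nat.digits_def' (by norm_num : 1 < 10) hn]
      simp

theorem pvDigitChar_inj {a b : Nat} (ha : a < 10) (hb : b < 10)
    (h : Nat.digitChar a = Nat.digitChar b) : a = b := by
  interval_cases a <;> interval_cases b <;> simp_all [Nat.digitChar]

theorem pvMap_digitChar_inj : ∀ (l1 l2 : List Nat), (∀ d ∈ l1, d < 10) → (∀ d ∈ l2, d < 10) →
    l1.map Nat.digitChar = l2.map Nat.digitChar → l1 = l2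
  | [], [], _, _, _ => rfl
  | a :: l1, b :: l2, h1, h2, h => by
    simp only [List.map_cons, List.cons.injEq] at h
    have := pvDigitChar_inj (h1 a (by simp)) (h2 b (by simp)) h.1
    rw [this, pvMap_digitChar_inj l1 l2 (fun d hd => h1 d (by simp [hd]))
      (fun d hd => h2 d (by simp [hd])) h.2]
  | [], _ :: _, _, _, h => by simp at h
  | _ :: _, [], _, _, h => by simp at h

theorem pvRep_ne_zero_char (n : Nat) (hn : n ≠ 0) : pvRep n ≠ ['0'] := by
  intro h
  rw [pvRep, List.reverse_eq_iff] at h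
  have hmap : (Nat.digits 10 n).map Nat.digitChar = ['0'] := by simpa using h
  have hd : Nat.digits 10 n = [0] :=
    pvMap_digitChar_inj (Nat.digits 10 n) [0]
      (fun d hd => Nat.digits_lt_base (by norm_num) hd) (by simp)
      (by rw [hmap]; norm_num [Nat.digitChar])
  have hlast := Nat.getLast_digit_ne_zero 10 hn
  simp [hd] at hlast

theorem pvRep_inj {m n : Nat} (h : pvRep m = pvRep n) : m = n := by
  have h2 : (Nat.digits 10 m).map Nat.digitChar = (Nat.digits 10 n).map Nat.digitChar := by
    have := congrArg List.reverse h; simpa [pvRep] using this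
  exact Nat.digits.injective 10 (pvMap_digitChar_inj _ _
    (fun d hd => Nat.digits_lt_base (by norm_num) hd)
    (fun d hd => Nat.digits_lt_base (by norm_num) hd) h2)

theorem pvToDigits10_inj {m n : Nat} (h : Nat.toDigits 10 m = Nat.toDigits 10 n) : m = n := by
  rw [Nat.toDigits, Nat.toDigits, pvToDigitsCore_eq _ _ _ (Nat.lt_succ_self m),
      pvToDigitsCore_eq _ _ _ (Nat.lt_succ_self n)] at h
  simp only [List.append_nil] at h
  by_cases hm : m = 0 <;> by_cases hn : n = 0 <;> simp [hm, hn] at h ⊢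
  · exact absurd h.symm (pvRep_ne_zero_char n hn)
  · exact absurd h (pvRep_ne_zero_char m hm)
  · exact pvRep_inj h

theorem pvToStr_succ_inj {i j : Int} (hi : 0 ≤ i) (hj : 0 ≤ j)
    (h : PySem.Int.toStr (i + 1) = PySem.Int.toStr (j + 1)) : i = j := by
  rw [PySem.Int.toStr, PySem.Int.toStr] at h
  have h2 : PySem.Int.toChars (i + 1) = PySem.Int.toChars (j + 1) := by
    have := congrArg String.toList h; simpa using this
  rw [PySem.Int.toChars, PySem.Int.toChars, if_neg (by omega), if_neg (by omega)] at h2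
  have := pvToDigits10_inj h2
  omega

/- proof-side vocabulary (A side) -/
def pvSid (p : Int × String) : String := PySem.Int.toStr (p.1 + 1)
def pvEid (q : Int × String) : String := PySem.Int.toStr (q.1 + 1)

def pvKeptQ (c : PySem.Dict String Int) (qs : List (Int × String)) : List (String × String) :=
  (qs.map (fun q => (pvEid q, q.2))).filter (fun e => decide (c.getD e.2 0 ≥ 2))

def pvCounts (textCorpus : List String) : PySem.Dict String Int :=
  (PySem.List.enumerate textCorpus).foldl (fun c p =>
    (PySem.List.enumerate (pvWords p.2)).foldl
      (fun c q => c.insert q.2 (c.getD q.2 0 + 1)) c) PySem.Dict.empty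

def pvSpec (c : PySem.Dict String Int) (textCorpus : List String) :
    List (String × List (String × String)) :=
  ((PySem.List.enumerate textCorpus).map
      (fun p => (pvSid p, pvKeptQ c (PySem.List.enumerate (pvWords p.2))))).filter
    (fun e => !e.2.isEmpty)

/- enumerate-from-0 indices mapped through str(·+1) are distinct -/
theorem pvEnum_toStr_nodup {α : Type} (xs : List α) :
    ((PySem.List.enumerate xs).map (fun p => PySem.Int.toStr (p.1 + 1))).Nodup := by
  have h1 : ((PySem.List.enumerate xs).map Prod.fst).Nodup := by
    have := PySem.List.pairwise_lt_enumerate xs 0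
    exact (List.pairwise_map.mpr (this.imp (fun h => ne_of_lt h)))
  have hmem : ∀ i ∈ (PySem.List.enumerate xs).map Prod.fst, 0 ≤ i := by
    intro i hi
    rcases List.mem_map.mp hi with ⟨p, hp, hpe⟩
    rcases (PySem.List.mem_enumerate_iff xs 0 p).mp hp with ⟨k, hk, hpk⟩
    subst hpe; rw [hpk]; simp
  have h2 : (PySem.List.enumerate xs).map (fun p => PySem.Int.toStr (p.1 + 1))
      = ((PySem.List.enumerate xs).map Prod.fst).map (fun i => PySem.Int.toStr (i + 1)) := by
    simp [List.map_map, Function.comp]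
  rw [h2]
  exact List.Nodup.map_on
    (fun i hi j hj h => pvToStr_succ_inj (hmem i hi) (hmem j hj) h) h1

/- counts: A's first loop computes pvCounts -/
theorem pvMinSup_eq (textCorpus : List String) :
    (PySem.List.enumerate textCorpus).foldl (fun d p =>
      (PySem.List.enumerate (pvWords p.2)).foldl (fun d q =>
        if d.contains q.2 = false then d.insert q.2 1
        else d.insert q.2 (d.getD q.2 0 + 1)) d) PySem.Dict.empty = pvCounts textCorpus := by
  have hstep : (fun (d : PySem.Dict String Int) (q : Int × String) =>
      if d.contains q.2 = false then d.insert q.2 1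
      else d.insert q.2 (d.getD q.2 0 + 1)) =
      fun d q => d.insert q.2 (d.getD q.2 0 + 1) := by
    funext d q
    by_cases h : d.contains q.2 = false
    · rw [if_pos h, PySem.Dict.getD_of_not_contains d 0 h]; norm_num
    · rw [if_neg h]
  rw [pvCounts]
  simp only [hstep]

/- replacing the value at the last (unique) key -/
theorem pvReplace_append_last {ν : Type} (pre : List (String × ν)) (k : String) (v old : ν)
    (h : k ∉ pre.map Prod.fst) :
    (pre ++ [(k, old)]).map (fun p => if p.1 == k then (k, v) else p) = pre ++ [(k, v)] := by
  induction pre with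
  | nil => simp
  | cons a pre ih =>
    simp only [List.map_cons] at h
    rw [List.cons_append, List.map_cons]
    have ha : (a.1 == k) = false := by
      simp only [beq_eq_false_iff_ne, ne_eq]
      intro he; exact h (by simp [← he])
    rw [ha]
    simp only [List.cons_append, List.cons.injEq]
    exact ⟨rfl, ih (fun hm => h (List.mem_cons_of_mem a.1 hm))⟩

/- A's word loop, phase 2: SID already present as the LAST entry -/
theorem pvA_line2 (c : PySem.Dict String Int) (sid : String) :
    ∀ (qs : List (Int × String)) (pre : List (String × PySem.Dict String String))
      (inner : List (String × String)),
      sid ∉ pre.map Prod.fst → (pre.map Prod.fst).Nodup →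
      (inner.map Prod.fst ++ qs.map pvEid).Nodup →
      qs.foldl (fun df q =>
          if c.getD q.2 0 ≥ 2 then
            (if df.contains sid = false then df.insert sid PySem.Dict.empty else df).insert sid
              (((if df.contains sid = false then df.insert sid PySem.Dict.empty else df).getD sid
                  PySem.Dict.empty).insert (pvEid q) q.2)
          else df) (PySem.Dict.mk (pre ++ [(sid, PySem.Dict.mk inner)]))
        = PySem.Dict.mk (pre ++ [(sid, PySem.Dict.mk (inner ++ pvKeptQ c qs))])
  | [], pre, inner, _, _, _ => by simp [pvKeptQ]
  | q :: qs, pre, inner, hpre, hprend, hnd => by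
    rw [List.foldl_cons]
    by_cases hq : c.getD q.2 0 ≥ 2
    · rw [if_pos hq]
      have hcon : (PySem.Dict.mk (pre ++ [(sid, PySem.Dict.mk inner)])).contains sid = true := by
        rw [PySem.Dict.contains_mk]
        simp
      rw [if_neg (by simp [hcon])]
      have hknd : (pre.map Prod.fst ++ [sid]).Nodup := by
        simp only [List.nodup_append, List.nodup_singleton]
        exact ⟨hprend, trivial, fun a ha b hb => by
          rw [List.mem_singleton] at hb; subst hb; intro he; exact hpre (he ▸ ha)⟩
      have hgetD : (PySem.Dict.mk (pre ++ [(sid, PySem.Dict.mk inner)])).getD sid PySem.Dict.empty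
          = PySem.Dict.mk inner :=
        PySem.Dict.getD_of_mem_items _ (by simp) (by simpa [PySem.Dict.keys_mk] using hknd) _
      rw [hgetD]
      have heidfresh : (PySem.Dict.mk inner).contains (pvEid q) = false := by
        rw [PySem.Dict.contains_mk, List.any_eq_false]
        intro p hp he
        rw [beq_iff_eq] at he
        have hmem : pvEid q ∈ inner.map Prod.fst := he ▸ List.mem_map_of_mem hp
        have hnd2 : (inner.map Prod.fst ++ (pvEid q :: qs.map pvEid)).Nodup := by
          simpa using hnd
        rcases List.nodup_append.mp hnd2 with ⟨-, -, hdisj⟩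
        exact hdisj _ hmem _ (by simp) rfl
      have hinner : (PySem.Dict.mk inner).insert (pvEid q) q.2
          = PySem.Dict.mk (inner ++ [(pvEid q, q.2)]) := by
        apply PySem.Dict.ext
        rw [PySem.Dict.items_insert_of_not_contains _ _ heidfresh]
      rw [hinner]
      have houter : (PySem.Dict.mk (pre ++ [(sid, PySem.Dict.mk inner)])).insert sid
            (PySem.Dict.mk (inner ++ [(pvEid q, q.2)]))
          = PySem.Dict.mk (pre ++ [(sid, PySem.Dict.mk (inner ++ [(pvEid q, q.2)]))]) := by
        apply PySem.Dict.ext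
        rw [PySem.Dict.items_insert_of_contains _ _ hcon]
        exact pvReplace_append_last pre sid _ _ hpre
      rw [houter]
      have hnd' : ((inner ++ [(pvEid q, q.2)]).map Prod.fst ++ qs.map pvEid).Nodup := by
        simp only [List.map_append, List.map_cons] at hnd ⊢
        simpa [List.append_assoc] using hnd
      rw [pvA_line2 c sid qs pre (inner ++ [(pvEid q, q.2)]) hpre hprend hnd']
      have : pvKeptQ c (q :: qs) = (pvEid q, q.2) :: pvKeptQ c qs := by
        simp [pvKeptQ, hq]
      rw [this, List.append_assoc]
      rfl
    · rw [if_neg hq]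
      have hnd' : (inner.map Prod.fst ++ qs.map pvEid).Nodup := by
        simp only [List.map_cons] at hnd
        refine hnd.sublist ?_
        exact List.Sublist.append_left (List.sublist_cons_self _ _) _
      rw [pvA_line2 c sid qs pre inner hpre hprend hnd']
      have : pvKeptQ c (q :: qs) = pvKeptQ c qs := by
        simp [pvKeptQ, hq]
      rw [this]

/- A's word loop, phase 1: SID not yet present -/
theorem pvA_line1 (c : PySem.Dict String Int) (sid : String) :
    ∀ (qs : List (Int × String)) (df : PySem.Dict String (PySem.Dict String String)),
      df.contains sid = false → df.keys.Nodup → (qs.map pvEid).Nodup →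
      qs.foldl (fun df q =>
          if c.getD q.2 0 ≥ 2 then
            (if df.contains sid = false then df.insert sid PySem.Dict.empty else df).insert sid
              (((if df.contains sid = false then df.insert sid PySem.Dict.empty else df).getD sid
                  PySem.Dict.empty).insert (pvEid q) q.2)
          else df) df
        = if pvKeptQ c qs = [] then df
          else PySem.Dict.mk (df.items ++ [(sid, PySem.Dict.mk (pvKeptQ c qs))])
  | [], df, _, _, _ => by simp [pvKeptQ]
  | q :: qs, df, hfresh, hnd, hqnd => by
    rw [List.foldl_cons]
    by_cases hq : c.getD q.2 0 ≥ 2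
    · rw [if_pos hq, if_pos hfresh, PySem.Dict.getD_insert_self]
      have hempty : (PySem.Dict.empty : PySem.Dict String String).insert (pvEid q) q.2
          = PySem.Dict.mk [(pvEid q, q.2)] := by
        apply PySem.Dict.ext
        rw [PySem.Dict.items_insert_of_not_contains _ _ (PySem.Dict.contains_empty _)]
        rfl
      rw [hempty]
      have hstep : (df.insert sid PySem.Dict.empty).insert sid (PySem.Dict.mk [(pvEid q, q.2)])
          = PySem.Dict.mk (df.items ++ [(sid, PySem.Dict.mk [(pvEid q, q.2)])]) := by
        apply PySem.Dict.ext
        rw [PySem.Dict.insert_insert_self, PySem.Dict.items_insert_of_not_contains _ _ hfresh]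
      rw [hstep]
      have hkeys : df.keys = df.items.map Prod.fst := by
        simp [PySem.Dict.keys]
      have hsidnotpre : sid ∉ df.items.map Prod.fst := by
        rw [← hkeys]
        intro hmem
        rw [← PySem.Dict.contains_iff_mem_keys] at hmem
        rw [hfresh] at hmem
        exact Bool.false_ne_true hmem
      have hitemsnd : (df.items.map Prod.fst).Nodup := hkeys ▸ hnd
      have hqnd' : (([(pvEid q, q.2)].map (Prod.fst : String × String → String))
          ++ qs.map pvEid).Nodup := by simpa using hqnd
      rw [pvA_line2 c sid qs df.items [(pvEid q, q.2)] hsidnotpre hitemsnd hqnd']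
      have hk : pvKeptQ c (q :: qs) = (pvEid q, q.2) :: pvKeptQ c qs := by
        simp [pvKeptQ, hq]
      rw [hk, if_neg (by simp)]
      rfl
    · rw [if_neg hq]
      have hk : pvKeptQ c (q :: qs) = pvKeptQ c qs := by
        simp [pvKeptQ, hq]
      rw [pvA_line1 c sid qs df hfresh hnd (by simpa using hqnd.of_cons), hk]

theorem pvContains_false_of_not_mem {ν : Type} (d : PySem.Dict String ν) (k : String)
    (h : k ∉ d.keys) : d.contains k = false := by
  cases hc : d.contains k
  · rfl
  · exact absurd ((PySem.Dict.contains_iff_mem_keys d k).mp hc) h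

/- A's second corpus loop -/
theorem pvA_outer (c : PySem.Dict String Int) :
    ∀ (ps : List (Int × String)) (df : PySem.Dict String (PySem.Dict String String)),
      df.keys.Nodup → (∀ p ∈ ps, df.contains (pvSid p) = false) → (ps.map pvSid).Nodup →
      (ps.foldl (fun df p =>
          (PySem.List.enumerate (pvWords p.2)).foldl (fun df q =>
            if c.getD q.2 0 ≥ 2 then
              (if df.contains (pvSid p) = false then df.insert (pvSid p) PySem.Dict.empty else df).insert (pvSid p)
                (((if df.contains (pvSid p) = false then df.insert (pvSid p) PySem.Dict.empty else df).getD (pvSid p)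
                    PySem.Dict.empty).insert (pvEid q) q.2)
            else df) df) df).items
        = df.items ++ ((ps.map (fun p => (pvSid p, PySem.Dict.mk (pvKeptQ c (PySem.List.enumerate (pvWords p.2)))))).filter
            (fun e => !e.2.items.isEmpty))
  | [], df, _, _, _ => by simp
  | p :: ps, df, hnd, hfresh, hsnd => by
    rw [List.foldl_cons]
    have heids : ((PySem.List.enumerate (pvWords p.2)).map pvEid).Nodup :=
      pvEnum_toStr_nodup (pvWords p.2)
    rw [pvA_line1 c (pvSid p) (PySem.List.enumerate (pvWords p.2)) df
      (hfresh p List.mem_cons_self) hnd heids]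
    simp only [List.map_cons, List.nodup_cons] at hsnd
    by_cases hk : pvKeptQ c (PySem.List.enumerate (pvWords p.2)) = []
    · rw [if_pos hk]
      rw [pvA_outer c ps df hnd (fun b hb => hfresh b (List.mem_cons_of_mem p hb)) hsnd.2]
      simp [hk]
    · rw [if_neg hk]
      have hkeys2 : (PySem.Dict.mk (df.items ++ [(pvSid p, PySem.Dict.mk (pvKeptQ c (PySem.List.enumerate (pvWords p.2))))])).keys
          = df.keys ++ [pvSid p] := by
        rw [PySem.Dict.keys_mk, List.map_append]
        simp [PySem.Dict.keys]
      have hsidnot : pvSid p ∉ df.keys := by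
        intro hmem
        have := (PySem.Dict.contains_iff_mem_keys df (pvSid p)).mpr hmem
        rw [hfresh p List.mem_cons_self] at this
        exact Bool.false_ne_true this
      have hnd2 : (PySem.Dict.mk (df.items ++ [(pvSid p, PySem.Dict.mk (pvKeptQ c (PySem.List.enumerate (pvWords p.2))))])).keys.Nodup := by
        rw [hkeys2]
        simp only [List.nodup_append, List.nodup_singleton]
        exact ⟨hnd, trivial, fun a ha b hb => by
          rw [List.mem_singleton] at hb; subst hb; intro he; exact hsidnot (he ▸ ha)⟩
      have hfresh2 : ∀ b ∈ ps, (PySem.Dict.mk (df.items ++ [(pvSid p, PySem.Dict.mk (pvKeptQ c (PySem.List.enumerate (pvWords p.2))))])).contains (pvSid b) = false := by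
        intro b hb
        apply pvContains_false_of_not_mem
        rw [hkeys2]
        rw [List.mem_append, List.mem_singleton]
        rintro (h1 | h2)
        · have := (PySem.Dict.contains_iff_mem_keys df (pvSid b)).mpr h1
          rw [hfresh b (List.mem_cons_of_mem p hb)] at this
          exact Bool.false_ne_true this
        · exact hsnd.1 (h2 ▸ List.mem_map_of_mem hb)
      rw [pvA_outer c ps _ hnd2 hfresh2 hsnd.2]
      simp [hk, List.append_assoc]

theorem pvA_eq (textCorpus : List String) :
    createSpadeDatabase textCorpus = pvSpec (pvCounts textCorpus) textCorpus := by
  unfold createSpadeDatabase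
  simp only [pvMinSup_eq]
  have hstep : (fun (df : PySem.Dict String (PySem.Dict String String)) (p : Int × String) =>
      (PySem.List.enumerate (pvWords p.2)).foldl (fun df q =>
        if (pvCounts textCorpus).getD q.2 0 ≥ 2 then
          (if df.contains (pvSid p) = false then df.insert (pvSid p) PySem.Dict.empty else df).insert (pvSid p)
            (((if df.contains (pvSid p) = false then df.insert (pvSid p) PySem.Dict.empty else df).getD (pvSid p)
                PySem.Dict.empty).insert (pvEid q) q.2)
        else df) df) = (fun df p =>
      (PySem.List.enumerate (pvWords p.2)).foldl (fun df q =>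
        if (pvCounts textCorpus).getD q.2 0 ≥ 2 then
          (if df.contains (PySem.Int.toStr (p.1 + 1)) = false then df.insert (PySem.Int.toStr (p.1 + 1)) PySem.Dict.empty else df).insert (PySem.Int.toStr (p.1 + 1))
            (((if df.contains (PySem.Int.toStr (p.1 + 1)) = false then df.insert (PySem.Int.toStr (p.1 + 1)) PySem.Dict.empty else df).getD (PySem.Int.toStr (p.1 + 1))
                PySem.Dict.empty).insert (PySem.Int.toStr (q.1 + 1)) q.2)
        else df) df) := rfl
  rw [← hstep]
  rw [pvA_outer (pvCounts textCorpus) (PySem.List.enumerate textCorpus) PySem.Dict.empty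
    (by simp [PySem.Dict.keys_empty]) (fun p _ => PySem.Dict.contains_empty _)
    (pvEnum_toStr_nodup textCorpus)]
  rw [pvSpec]
  have hemp : (PySem.Dict.empty : PySem.Dict String (PySem.Dict String String)).items
      = ([] : List (String × PySem.Dict String String)) := rfl
  rw [hemp]
  simp only [List.nil_append, List.filter_map, List.map_map]
  rfl

-- ===================== B side =====================

def pvOcc (tc : List String) : List (Int × Int × String) :=
  (PySem.List.enumerate tc 1).flatMap (fun p =>
    (PySem.List.enumerate (pvWords p.2) 1).map (fun q => (p.1, q.1, q.2)))

def pvPairs (tc : List String) : List (String × (Int × Int)) :=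
  (pvOcc tc).map (fun t => (t.2.2, (t.1, t.2.1)))

def pvIdlists (tc : List String) : PySem.Dict String (List (Int × Int)) :=
  (pvPairs tc).foldl (fun d pr => d.modify pr.1 [] (· ++ [pr.2])) PySem.Dict.empty

def pvOccsOf (tc : List String) (w : String) : List (Int × Int) :=
  ((pvPairs tc).filter (fun pr => pr.1 == w)).map (·.2)

theorem pvFoldl_flatMap {α β σ : Type} (l : List α) (g : α → List β) (F : σ → β → σ) (init : σ) :
    (l.flatMap g).foldl F init = l.foldl (fun s a => (g a).foldl F s) init := by
  induction l generalizing init with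
  | nil => rfl
  | cons a l ih => simp [List.flatMap_cons, List.foldl_append, ih]

theorem pvCounts_inner (ws : List String) : ∀ (s : Int) (c0 : PySem.Dict String Int),
    (PySem.List.enumerate ws s).foldl (fun c q => c.insert q.2 (c.getD q.2 0 + 1)) c0
      = ws.foldl (fun c x => c.insert x (c.getD x 0 + 1)) c0 := by
  induction ws with
  | nil => intro s c0; simp [PySem.List.enumerate_nil]
  | cons x ws ih => intro s c0; simp [PySem.List.enumerate_cons, ih]

theorem pvCounts_outer (tc : List String) : ∀ (s : Int) (c0 : PySem.Dict String Int),
    (PySem.List.enumerate tc s).foldl (fun c p =>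
      (PySem.List.enumerate (pvWords p.2)).foldl (fun c q => c.insert q.2 (c.getD q.2 0 + 1)) c) c0
      = (tc.flatMap pvWords).foldl (fun c x => c.insert x (c.getD x 0 + 1)) c0 := by
  induction tc with
  | nil => intro s c0; simp [PySem.List.enumerate_nil]
  | cons line tc ih =>
    intro s c0
    simp only [PySem.List.enumerate_cons, List.foldl_cons, List.flatMap_cons, List.foldl_append]
    rw [pvCounts_inner, ih]

theorem pvCounts_getD (tc : List String) (w : String) :
    (pvCounts tc).getD w 0 = ((tc.flatMap pvWords).count w : Int) := by
  rw [pvCounts, pvCounts_outer, PySem.Dict.getD_foldl_insert_add_one]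
  simp

theorem pvPairs_eq (tc : List String) :
    pvPairs tc = (PySem.List.enumerate tc 1).flatMap (fun p =>
      (PySem.List.enumerate (pvWords p.2) 1).map (fun q => (q.2, (p.1, q.1)))) := by
  simp [pvPairs, pvOcc, List.map_flatMap, List.map_map, Function.comp_def]

theorem pvIdl_inner (sid : Int) (ws : List String) : ∀ (s : Int) (d : PySem.Dict String (List (Int × Int))),
    (PySem.List.enumerate ws s).foldl (fun d q => d.modify q.2 [] (· ++ [(sid, q.1)])) d
      = ((PySem.List.enumerate ws s).map (fun q => (q.2, (sid, q.1)))).foldl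
          (fun d pr => d.modify pr.1 [] (· ++ [pr.2])) d := by
  induction ws with
  | nil => intro s d; simp [PySem.List.enumerate_nil]
  | cons x ws ih => intro s d; simp only [PySem.List.enumerate_cons, List.foldl_cons, List.map_cons]; rw [ih]

theorem pvIdl_eq (tc : List String) :
    (PySem.List.enumerate tc 1).foldl (fun d p =>
      (PySem.List.enumerate (pvWords p.2) 1).foldl (fun d q =>
        d.modify q.2 [] (· ++ [(p.1, q.1)])) d) PySem.Dict.empty = pvIdlists tc := by
  rw [pvIdlists, pvPairs_eq, pvFoldl_flatMap]
  apply PySem.List.foldl_congr_mem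
  intro d p _
  rw [pvIdl_inner]

theorem pvIdl_getD (tc : List String) (w : String) :
    (pvIdlists tc).getD w [] = pvOccsOf tc w := by
  rw [pvIdlists, PySem.Dict.getD_foldl_modify_append]
  simp [pvOccsOf, PySem.Dict.getD_empty]

theorem pvFlatMap_enum_snd {α β : Type} (xs : List α) (s : Int) (h : α → List β) :
    (PySem.List.enumerate xs s).flatMap (fun p => h p.2) = xs.flatMap h := by
  induction xs generalizing s with
  | nil => simp [PySem.List.enumerate_nil]
  | cons x xs ih => simp [PySem.List.enumerate_cons, ih]

theorem pvPairs_fst (tc : List String) : (pvPairs tc).map (·.1) = tc.flatMap pvWords := by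
  rw [pvPairs_eq, List.map_flatMap]
  have h : ∀ p : Int × String,
      ((PySem.List.enumerate (pvWords p.2) 1).map (fun q => (q.2, (p.1, q.1)))).map (·.1)
        = pvWords p.2 := by
    intro p
    rw [List.map_map]
    exact PySem.List.map_snd_enumerate (pvWords p.2) 1
  calc (PySem.List.enumerate tc 1).flatMap
        (fun p => ((PySem.List.enumerate (pvWords p.2) 1).map (fun q => (q.2, (p.1, q.1)))).map (·.1))
      = (PySem.List.enumerate tc 1).flatMap (fun p => pvWords p.2) := by
        exact List.flatMap_congr (fun p _ => h p)
    _ = tc.flatMap pvWords := pvFlatMap_enum_snd tc 1 pvWords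

theorem pvMem_pairs (tc : List String) (w : String) (o : Int × Int) :
    (w, o) ∈ pvPairs tc ↔ (o.1, o.2, w) ∈ pvOcc tc := by
  rw [pvPairs]
  constructor
  · intro h
    rcases List.mem_map.mp h with ⟨t, ht, he⟩
    obtain ⟨h1, h2⟩ := Prod.mk.injEq .. ▸ he
    have : t = (o.1, o.2, w) := by
      obtain ⟨t1, t2, t3⟩ := t
      obtain ⟨o1, o2⟩ := o
      simp_all
    exact this ▸ ht
  · intro h
    have := List.mem_map_of_mem (f := fun t : Int × Int × String => (t.2.2, (t.1, t.2.1))) h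
    simpa using this

theorem pvMem_occsOf (tc : List String) (w : String) (o : Int × Int) :
    o ∈ pvOccsOf tc w ↔ (w, o) ∈ pvPairs tc := by
  rw [pvOccsOf]
  constructor
  · intro h
    rcases List.mem_map.mp h with ⟨pr, hpr, he⟩
    rcases List.mem_filter.mp hpr with ⟨hmem, hw⟩
    have : pr = (w, o) := by
      obtain ⟨a, b⟩ := pr
      simp only [beq_iff_eq] at hw
      simp_all
    exact this ▸ hmem
  · intro h
    exact List.mem_map_of_mem (List.mem_filter.mpr ⟨h, by simp⟩)

theorem pvLength_occsOf (tc : List String) (w : String) :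
    (pvOccsOf tc w).length = (tc.flatMap pvWords).count w := by
  rw [pvOccsOf, List.length_map, ← pvPairs_fst tc, List.count_eq_countP, List.countP_map,
      List.countP_eq_length_filter]
  rfl

theorem pvPairs_snd_nodup (tc : List String) : ((pvPairs tc).map (·.2)).Nodup := by
  have hEq : (pvPairs tc).map (·.2)
      = (PySem.List.enumerate tc 1).flatMap (fun p =>
          (PySem.List.enumerate (pvWords p.2) 1).map (fun q => (p.1, q.1))) := by
    rw [pvPairs_eq, List.map_flatMap]
    exact List.flatMap_congr (fun p _ => by rw [List.map_map]; rfl)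
  rw [hEq]
  set R : (Int × Int) → (Int × Int) → Prop :=
    fun a b => a.1 < b.1 ∨ (a.1 = b.1 ∧ a.2 < b.2) with hR
  have hpw : ((PySem.List.enumerate tc 1).flatMap (fun p =>
      (PySem.List.enumerate (pvWords p.2) 1).map (fun q => (p.1, q.1)))).Pairwise R := by
    rw [List.flatMap_def, List.pairwise_flatten]
    refine ⟨?_, ?_⟩
    · intro xs hxs
      rcases List.mem_map.mp hxs with ⟨p, _, rfl⟩
      refine List.pairwise_map.mpr ?_
      exact (PySem.List.pairwise_lt_enumerate (pvWords p.2) 1).imp (fun h => Or.inr ⟨rfl, h⟩)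
    · refine List.pairwise_map.mpr ?_
      refine (PySem.List.pairwise_lt_enumerate tc 1).imp ?_
      intro p p' hlt x hx y hy
      rcases List.mem_map.mp hx with ⟨q, _, rfl⟩
      rcases List.mem_map.mp hy with ⟨q', _, rfl⟩
      exact Or.inl hlt
  exact hpw.imp_of_mem (fun {a b} _ _ hr => by
    rintro rfl
    rcases hr with h | ⟨-, h⟩ <;> exact lt_irrefl _ h)

theorem pvIdl_keys_nodup (tc : List String) : (pvIdlists tc).keys.Nodup := by
  rw [pvIdlists]
  exact PySem.Dict.nodup_keys_foldl_modify_key (pvPairs tc) (fun pr => pr.1) []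
    (fun _ pr => (· ++ [pr.2])) PySem.Dict.empty (by simp [PySem.Dict.keys_empty])

theorem pvIdl_keys_mem (tc : List String) (w : String) :
    w ∈ (pvIdlists tc).keys ↔ w ∈ (pvPairs tc).map (·.1) := by
  rw [pvIdlists,
    PySem.Dict.keys_foldl_modify_key (pvPairs tc) (fun pr => pr.1) [] (fun _ pr => (· ++ [pr.2]))
      PySem.Dict.empty]
  rw [PySem.Dict.keys_empty]
  exact PySem.Set.mem_ofList _ _

theorem pvIdl_items (tc : List String) :
    (pvIdlists tc).items = (pvIdlists tc).keys.map (fun w => (w, pvOccsOf tc w)) := by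
  rw [PySem.Dict.items_eq_map_keys (pvIdlists tc) (pvIdl_keys_nodup tc) []]
  exact List.map_congr_left (fun w _ => by rw [pvIdl_getD])

def pvStep (w : String) (b : PySem.Dict Int (PySem.Dict Int String)) (o : Int × Int) :
    PySem.Dict Int (PySem.Dict Int String) :=
  b.insert o.1 ((b.getD o.1 PySem.Dict.empty).insert o.2 w)

def pvPos (t : Int × Int × String) : Int × Int := (t.1, t.2.1)

def pvKeptTriples (its : List (String × List (Int × Int))) : List (Int × Int × String) :=
  (its.filter (fun kv => decide (2 ≤ kv.2.length))).flatMap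
    (fun kv => kv.2.map (fun o => (o.1, o.2, kv.1)))

def pvGood (b : PySem.Dict Int (PySem.Dict Int String)) (T : List (Int × Int × String)) : Prop :=
  b.keys.Nodup ∧
  (∀ sid : Int, sid ∈ b.keys ↔ ∃ t ∈ T, t.1 = sid) ∧
  (∀ sid : Int, (b.getD sid PySem.Dict.empty).keys.Nodup) ∧
  (∀ sid eid : Int, eid ∈ (b.getD sid PySem.Dict.empty).keys ↔ ∃ t ∈ T, t.1 = sid ∧ t.2.1 = eid) ∧
  (∀ t ∈ T, (b.getD t.1 PySem.Dict.empty).get? t.2.1 = some t.2.2)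

theorem pvGood_empty : pvGood PySem.Dict.empty [] := by
  refine ⟨by simp [PySem.Dict.keys_empty], ?_, ?_, ?_, by simp⟩
  · intro sid; simp [PySem.Dict.keys_empty]
  · intro sid; simp [PySem.Dict.getD_empty, PySem.Dict.keys_empty]
  · intro sid eid; simp [PySem.Dict.getD_empty, PySem.Dict.keys_empty]

theorem pvStep_good {b T} {w : String} {o : Int × Int} (hg : pvGood b T)
    (hfresh : ∀ t ∈ T, pvPos t ≠ o) :
    pvGood (pvStep w b o) (T ++ [(o.1, o.2, w)]) := by
  obtain ⟨hnd, hkm, hin, him, hlk⟩ := hg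
  refine ⟨PySem.Dict.nodup_keys_insert _ _ _ hnd, ?_, ?_, ?_, ?_⟩
  · intro sid
    rw [pvStep, PySem.Dict.mem_keys_insert, hkm]
    constructor
    · rintro (rfl | ⟨t, ht, rfl⟩)
      · exact ⟨(o.1, o.2, w), by simp⟩
      · exact ⟨t, by simp [ht]⟩
    · rintro ⟨t, ht, rfl⟩
      rcases List.mem_append.mp ht with h | h
      · exact Or.inr ⟨t, h, rfl⟩
      · rw [List.mem_singleton] at h; subst h; exact Or.inl rfl
  · intro sid
    rw [pvStep, PySem.Dict.getD_insert]
    split_ifs with h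
    · exact PySem.Dict.nodup_keys_insert _ _ _ (hin o.1)
    · exact hin sid
  · intro sid eid
    rw [pvStep, PySem.Dict.getD_insert]
    split_ifs with h
    · subst h
      rw [PySem.Dict.mem_keys_insert, him]
      constructor
      · rintro (rfl | ⟨t, ht, h1, rfl⟩)
        · exact ⟨(o.1, o.2, w), by simp⟩
        · exact ⟨t, by simp [ht, h1]⟩
      · rintro ⟨t, ht, h1, rfl⟩
        rcases List.mem_append.mp ht with hmem | hmem
        · exact Or.inr ⟨t, hmem, h1, rfl⟩
        · rw [List.mem_singleton] at hmem; subst hmem; exact Or.inl rfl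
    · rw [him]
      constructor
      · rintro ⟨t, ht, h1, rfl⟩
        exact ⟨t, List.mem_append_left _ ht, h1, rfl⟩
      · rintro ⟨t, ht, h1, rfl⟩
        rcases List.mem_append.mp ht with hmem | hmem
        · exact ⟨t, hmem, h1, rfl⟩
        · rw [List.mem_singleton] at hmem; subst hmem; exact absurd h1.symm h
  · intro t ht
    rcases List.mem_append.mp ht with hmem | hmem
    · have hlk' := hlk t hmem
      rw [pvStep, PySem.Dict.getD_insert]
      split_ifs with h
      · rw [PySem.Dict.get?_insert]
        rw [if_neg (by
          intro he
          exact hfresh t hmem (by rw [pvPos, h, he]))]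
        rw [← h]; exact hlk'
      · exact hlk'
    · rw [List.mem_singleton] at hmem; subst hmem
      rw [pvStep]
      simp only
      rw [PySem.Dict.getD_insert, if_pos rfl, PySem.Dict.get?_insert, if_pos rfl]

theorem pvScat_line {w : String} :
    ∀ (occs : List (Int × Int)) (b T), pvGood b T → (T.map pvPos ++ occs).Nodup →
      pvGood (occs.foldl (pvStep w) b) (T ++ occs.map (fun o => (o.1, o.2, w)))
  | [], b, T, hg, _ => by simpa using hg
  | o :: occs, b, T, hg, hnd => by
    rw [List.foldl_cons, List.map_cons]
    have hfresh : ∀ t ∈ T, pvPos t ≠ o := by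
      intro t ht he
      have h1 : o ∈ T.map pvPos := he ▸ List.mem_map_of_mem ht
      rcases List.nodup_append.mp hnd with ⟨-, -, hdisj⟩
      exact hdisj _ h1 _ (by simp) rfl
    have hg' := pvStep_good (w := w) hg hfresh
    have hnd' : ((T ++ [(o.1, o.2, w)]).map pvPos ++ occs).Nodup := by
      rw [List.map_append]
      have : ([(o.1, o.2, w)].map pvPos) = [o] := by simp [pvPos]
      rw [this, List.append_assoc]
      simpa using hnd
    have h2 := pvScat_line (w := w) occs _ _ hg' hnd'
    rw [List.append_assoc, List.singleton_append] at h2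
    exact h2

theorem pvScat_good :
    ∀ (its : List (String × List (Int × Int))) (b T), pvGood b T →
      (T.map pvPos ++ its.flatMap (fun kv => kv.2)).Nodup →
      pvGood (its.foldl (fun b kv =>
        if 2 ≤ kv.2.length then kv.2.foldl (pvStep kv.1) b else b) b) (T ++ pvKeptTriples its)
  | [], b, T, hg, _ => by simpa [pvKeptTriples] using hg
  | kv :: its, b, T, hg, hnd => by
    rw [List.foldl_cons]
    have hnd1 : (T.map pvPos ++ kv.2).Nodup := by
      have hnd'' := hnd
      rw [List.flatMap_cons, ← List.append_assoc] at hnd''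
      exact hnd''.sublist (List.sublist_append_left _ _)
    by_cases hlen : 2 ≤ kv.2.length
    · rw [if_pos hlen]
      have hg' := pvScat_line (w := kv.1) kv.2 b T hg hnd1
      have hnd' : ((T ++ kv.2.map (fun o => (o.1, o.2, kv.1))).map pvPos
          ++ its.flatMap (fun l => l.2)).Nodup := by
        rw [List.map_append]
        have : (kv.2.map (fun o => (o.1, o.2, kv.1))).map pvPos = kv.2 := by
          simp [pvPos, List.map_map, Function.comp_def]
        rw [this, List.append_assoc]
        simpa [List.flatMap_cons, List.append_assoc] using hnd
      have := pvScat_good its _ _ hg' hnd'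
      have hkt : pvKeptTriples (kv :: its)
          = kv.2.map (fun o => (o.1, o.2, kv.1)) ++ pvKeptTriples its := by
        simp [pvKeptTriples, hlen]
      rw [hkt, ← List.append_assoc]
      exact this
    · rw [if_neg hlen]
      have hnd' : (T.map pvPos ++ its.flatMap (fun l => l.2)).Nodup := by
        refine hnd.sublist ?_
        refine (List.Sublist.refl _).append ?_
        rw [List.flatMap_cons]
        exact List.sublist_append_right _ _
      have := pvScat_good its b T hg hnd'
      have hkt : pvKeptTriples (kv :: its) = pvKeptTriples its := by
        simp [pvKeptTriples, hlen]
      rw [hkt]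
      exact this

def pvLineKept (c : PySem.Dict String Int) (p : Int × String) : List (Int × String) :=
  (PySem.List.enumerate (pvWords p.2) 1).filter (fun q => decide (c.getD q.2 0 ≥ 2))
def pvSpecInt (c : PySem.Dict String Int) (tc : List String) : List (Int × List (Int × String)) :=
  ((PySem.List.enumerate tc 1).map (fun p => (p.1, pvLineKept c p))).filter (fun e => !e.2.isEmpty)
def pvEmbed (e : Int × List (Int × String)) : String × List (String × String) :=
  (PySem.Int.toStr e.1, e.2.map (fun q => (PySem.Int.toStr q.1, q.2)))
def pvKept (c : PySem.Dict String Int) (tc : List String) : List (Int × Int × String) :=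
  (pvOcc tc).filter (fun t => decide (c.getD t.2.2 0 ≥ 2))

theorem pvFreq_iff (tc : List String) (w : String) :
    (pvCounts tc).getD w 0 ≥ 2 ↔ 2 ≤ (pvOccsOf tc w).length := by
  rw [pvCounts_getD, pvLength_occsOf]; exact_mod_cast Iff.rfl

theorem pvWord_unique (tc : List String) {w w' : String} {o : Int × Int}
    (h : (w, o) ∈ pvPairs tc) (h' : (w', o) ∈ pvPairs tc) : w = w' := by
  have := List.inj_on_of_nodup_map (pvPairs_snd_nodup tc) h h' rfl
  exact congrArg Prod.fst this

theorem pvItems_flat_nodup (tc : List String) :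
    (((pvIdlists tc).items).flatMap (fun kv => kv.2)).Nodup := by
  rw [pvIdl_items, List.flatMap_map]
  show (List.flatMap (pvOccsOf tc) (pvIdlists tc).keys).Nodup
  rw [List.flatMap_def, List.nodup_flatten]
  constructor
  · intro xs hxs
    rcases List.mem_map.mp hxs with ⟨w, _, rfl⟩
    have hsub : (pvOccsOf tc w).Sublist ((pvPairs tc).map (·.2)) := by
      rw [pvOccsOf]
      exact List.Sublist.map _ List.filter_sublist
    exact (pvPairs_snd_nodup tc).sublist hsub
  · refine List.pairwise_map.mpr ?_
    refine (pvIdl_keys_nodup tc).imp_of_mem ?_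
    intro w w' _ _ hne o ho ho'
    exact absurd (pvWord_unique tc ((pvMem_occsOf tc w o).mp ho)
      ((pvMem_occsOf tc w' o).mp ho')) hne

theorem pvMem_keptTriples (tc : List String) (t : Int × Int × String) :
    t ∈ pvKeptTriples ((pvIdlists tc).items) ↔ t ∈ pvKept (pvCounts tc) tc := by
  obtain ⟨sid, eid, w⟩ := t
  rw [pvKeptTriples, pvKept, List.mem_flatMap]
  constructor
  · rintro ⟨kv, hkvf, hmem⟩
    rcases List.mem_filter.mp hkvf with ⟨hkv, hlen⟩
    rw [pvIdl_items] at hkv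
    rcases List.mem_map.mp hkv with ⟨w', _, rfl⟩
    rcases List.mem_map.mp hmem with ⟨⟨a, b⟩, ho, he⟩
    simp only [Prod.mk.injEq] at he
    obtain ⟨rfl, rfl, rfl⟩ := he
    have hpr : (w', (a, b)) ∈ pvPairs tc := (pvMem_occsOf tc w' (a, b)).mp ho
    refine List.mem_filter.mpr ⟨(pvMem_pairs tc w' (a, b)).mp hpr, ?_⟩
    simp only [decide_eq_true_eq] at hlen ⊢
    exact (pvFreq_iff tc w').mpr hlen
  · intro h
    rcases List.mem_filter.mp h with ⟨hocc, hfreq⟩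
    
    have hpr : (w, (sid, eid)) ∈ pvPairs tc := (pvMem_pairs tc w (sid, eid)).mpr hocc
    have hkey : w ∈ (pvIdlists tc).keys := by
      rw [pvIdl_keys_mem]
      exact List.mem_map_of_mem hpr
    refine ⟨(w, pvOccsOf tc w), List.mem_filter.mpr ⟨?_, ?_⟩, ?_⟩
    · rw [pvIdl_items]
      exact List.mem_map_of_mem hkey
    · simp only [decide_eq_true_eq]
      simp only [decide_eq_true_eq] at hfreq
      exact (pvFreq_iff tc w).mp hfreq
    · exact List.mem_map.mpr ⟨(sid, eid), (pvMem_occsOf tc w _).mpr hpr, rfl⟩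

theorem pvEnum_shift {α : Type} (xs : List α) (s t : Int) :
    PySem.List.enumerate xs (s + t) = (PySem.List.enumerate xs s).map (fun p => (p.1 + t, p.2)) := by
  induction xs generalizing s with
  | nil => simp [PySem.List.enumerate_nil]
  | cons x xs ih =>
    rw [PySem.List.enumerate_cons, PySem.List.enumerate_cons, List.map_cons]
    have := ih (s + 1)
    rw [show s + t + 1 = s + 1 + t by ring, this]

theorem pvEnum_fst_inj {α : Type} {xs : List α} {s : Int} {p p' : Int × α}
    (h : p ∈ PySem.List.enumerate xs s) (h' : p' ∈ PySem.List.enumerate xs s)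
    (he : p.1 = p'.1) : p = p' := by
  rcases (PySem.List.mem_enumerate_iff xs s p).mp h with ⟨k, hk, rfl⟩
  rcases (PySem.List.mem_enumerate_iff xs s p').mp h' with ⟨k', hk', rfl⟩
  simp only at he
  have : k = k' := by omega
  subst this; rfl

theorem pvKept_line (c : PySem.Dict String Int) (tc : List String) {p : Int × String}
    (hp : p ∈ PySem.List.enumerate tc 1) (eid : Int) (w : String) :
    (p.1, eid, w) ∈ pvKept c tc ↔ (eid, w) ∈ pvLineKept c p := by
  rw [pvKept, pvLineKept, List.mem_filter, List.mem_filter]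
  simp only
  constructor
  · rintro ⟨hocc, hc⟩
    refine ⟨?_, hc⟩
    rcases List.mem_flatMap.mp hocc with ⟨p', hp', hq⟩
    rcases List.mem_map.mp hq with ⟨q, hqm, he⟩
    simp only [Prod.mk.injEq] at he
    obtain ⟨h1, h2, h3⟩ := he
    have : p' = p := pvEnum_fst_inj hp' hp h1
    subst this
    rw [← h2, ← h3]
    exact hqm
  · rintro ⟨hq, hc⟩
    refine ⟨?_, hc⟩
    exact List.mem_flatMap.mpr ⟨p, hp, List.mem_map.mpr ⟨(eid, w), hq, rfl⟩⟩

theorem pvLine_bridge (c : PySem.Dict String Int) (sid : Int) (line : String) :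
    (pvLineKept c (sid, line)).map (fun q => (PySem.Int.toStr q.1, q.2))
      = pvKeptQ c (PySem.List.enumerate (pvWords line)) := by
  rw [pvLineKept, pvKeptQ]
  rw [show (1 : Int) = 0 + 1 from rfl, pvEnum_shift]
  rw [List.filter_map, List.map_map, List.filter_map]
  rfl

theorem pvLine_isEmpty (c : PySem.Dict String Int) (sid : Int) (line : String) :
    (pvLineKept c (sid, line)).isEmpty
      = (pvKeptQ c (PySem.List.enumerate (pvWords line))).isEmpty := by
  rw [← pvLine_bridge c sid line]
  cases pvLineKept c (sid, line) <;> rfl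

theorem pvSpec_bridge (c : PySem.Dict String Int) (tc : List String) :
    pvSpec c tc = (pvSpecInt c tc).map pvEmbed := by
  rw [pvSpec, pvSpecInt]
  rw [show (1 : Int) = 0 + 1 from rfl, pvEnum_shift, List.map_map]
  rw [List.filter_map, List.filter_map, List.map_map]
  have hfe : ∀ p : Int × String, p ∈ PySem.List.enumerate tc →
      ((fun e : String × List (String × String) => !e.2.isEmpty) ∘
        fun p : Int × String => (pvSid p, pvKeptQ c (PySem.List.enumerate (pvWords p.2)))) p
      = ((fun e : Int × List (Int × String) => !e.2.isEmpty) ∘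
        ((fun p : Int × String => (p.1, pvLineKept c p)) ∘ fun p : Int × String => (p.1 + 1, p.2))) p := by
    intro p _
    simp only [Function.comp_def]
    rw [pvLine_isEmpty c (p.1 + 1) p.2]
  rw [List.filter_congr hfe]
  apply List.map_congr_left
  intro p hp
  simp only [Function.comp_def, pvEmbed, pvSid]
  exact congrArg _ (pvLine_bridge c (p.1 + 1) p.2).symm

theorem pvBuckets_good (tc : List String) :
    pvGood (pvAltBuckets tc) (pvKeptTriples (pvIdlists tc).items) := by
  rw [pvAltBuckets, pvAltIdlists, pvIdl_eq]
  have h := pvScat_good (pvIdlists tc).items PySem.Dict.empty [] pvGood_empty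
    (by simpa using pvItems_flat_nodup tc)
  rw [List.nil_append] at h
  exact h

theorem pvOcc_fst (tc : List String) {t : Int × Int × String} (h : t ∈ pvOcc tc) :
    ∃ p ∈ PySem.List.enumerate tc 1, p.1 = t.1 := by
  rcases List.mem_flatMap.mp h with ⟨p, hp, hq⟩
  rcases List.mem_map.mp hq with ⟨q, _, rfl⟩
  exact ⟨p, hp, rfl⟩

theorem pvMem_specInt (c : PySem.Dict String Int) (tc : List String) (e : Int × List (Int × String)) :
    e ∈ pvSpecInt c tc ↔ ∃ p ∈ PySem.List.enumerate tc 1,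
      e = (p.1, pvLineKept c p) ∧ pvLineKept c p ≠ [] := by
  rw [pvSpecInt, List.mem_filter, List.mem_map]
  constructor
  · rintro ⟨⟨p, hp, rfl⟩, hne⟩
    exact ⟨p, hp, rfl, by simpa using hne⟩
  · rintro ⟨p, hp, rfl, hne⟩
    exact ⟨⟨p, hp, rfl⟩, by simpa using hne⟩

theorem pvKeys_iff (c : PySem.Dict String Int) (tc : List String) (sid : Int) :
    (∃ t ∈ pvKept c tc, t.1 = sid) ↔
      ∃ p ∈ PySem.List.enumerate tc 1, p.1 = sid ∧ pvLineKept c p ≠ [] := by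
  constructor
  · rintro ⟨t, ht, rfl⟩
    have hocc : t ∈ pvOcc tc := (List.mem_filter.mp ht).1
    rcases pvOcc_fst tc hocc with ⟨p, hp, hfst⟩
    refine ⟨p, hp, hfst, ?_⟩
    have : (t.2.1, t.2.2) ∈ pvLineKept c p := by
      rw [← pvKept_line c tc hp]
      rw [hfst]
      simpa using ht
    exact List.ne_nil_of_mem this
  · rintro ⟨p, hp, rfl, hne⟩
    rcases List.exists_mem_of_ne_nil _ hne with ⟨q, hq⟩
    exact ⟨(p.1, q.1, q.2), (pvKept_line c tc hp q.1 q.2).mpr hq, rfl⟩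

theorem pvSpecInt_fst_pairwise (c : PySem.Dict String Int) (tc : List String) :
    ((pvSpecInt c tc).map (·.1)).Pairwise (· < ·) := by
  have hsub : ((pvSpecInt c tc).map (·.1)).Sublist
      (((PySem.List.enumerate tc 1).map (fun p => (p.1, pvLineKept c p))).map (·.1)) :=
    List.Sublist.map _ List.filter_sublist
  have hall : (((PySem.List.enumerate tc 1).map (fun p => (p.1, pvLineKept c p))).map (·.1)).Pairwise (· < ·) := by
    rw [List.map_map]
    exact List.pairwise_map.mpr ((PySem.List.pairwise_lt_enumerate tc 1).imp (fun h => h))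
  exact hall.sublist hsub

theorem pvLineKept_fst_pairwise (c : PySem.Dict String Int) (p : Int × String) :
    ((pvLineKept c p).map (·.1)).Pairwise (· < ·) := by
  refine List.Pairwise.sublist (List.Sublist.map _ List.filter_sublist) ?_
  exact List.pairwise_map.mpr ((PySem.List.pairwise_lt_enumerate (pvWords p.2) 1).imp (fun h => h))

theorem pvB_eq (tc : List String) :
    createSpadeDatabase_alt tc = (pvSpecInt (pvCounts tc) tc).map pvEmbed := by
  rw [createSpadeDatabase_alt]
  obtain ⟨hknd, hkm, hin, him, hlk⟩ := pvBuckets_good tc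
  have hKT := pvMem_keptTriples tc
  -- outer sorted keys
  have houter : PySem.List.sorted (pvAltBuckets tc).keys (fun x => x) false
      = (pvSpecInt (pvCounts tc) tc).map (·.1) := by
    apply PySem.List.sorted_eq_of_perm_of_pairwise_lt
    · refine (List.perm_ext_iff_of_nodup ?_ hknd).mpr ?_
      · exact (pvSpecInt_fst_pairwise (pvCounts tc) tc).imp_of_mem (fun {a b} _ _ hr => by
          rintro rfl; exact lt_irrefl _ hr)
      · intro sid
        rw [hkm sid]
        constructor
        · intro hm
          rcases List.mem_map.mp hm with ⟨e, he, rfl⟩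
          rcases (pvMem_specInt (pvCounts tc) tc e).mp he with ⟨p, hp, rfl, hne⟩
          exact (fun ⟨t, ht, hfst⟩ => ⟨t, (hKT t).mpr ht, hfst⟩)
            ((pvKeys_iff (pvCounts tc) tc p.1).mpr ⟨p, hp, rfl, hne⟩)
        · rintro ⟨t, ht, rfl⟩
          rcases (pvKeys_iff (pvCounts tc) tc t.1).mp ⟨t, (hKT t).mp ht, rfl⟩ with ⟨p, hp, hfst, hne⟩
          refine List.mem_map.mpr ⟨(p.1, pvLineKept (pvCounts tc) p), ?_, hfst⟩
          exact (pvMem_specInt (pvCounts tc) tc _).mpr ⟨p, hp, rfl, hne⟩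
    · exact pvSpecInt_fst_pairwise (pvCounts tc) tc
  rw [houter, List.map_map]
  apply List.map_congr_left
  intro e he
  rcases (pvMem_specInt (pvCounts tc) tc e).mp he with ⟨p, hp, rfl, hne⟩
  simp only [Function.comp_def, pvEmbed]
  refine congrArg _ ?_
  -- inner: sorted inner keys, then values
  have hinner : PySem.List.sorted ((pvAltBuckets tc).getD p.1 PySem.Dict.empty).keys
      (fun x => x) false = (pvLineKept (pvCounts tc) p).map (·.1) := by
    apply PySem.List.sorted_eq_of_perm_of_pairwise_lt
    · refine (List.perm_ext_iff_of_nodup ?_ (hin p.1)).mpr ?_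
      · exact (pvLineKept_fst_pairwise (pvCounts tc) p).imp_of_mem (fun {a b} _ _ hr => by
          rintro rfl; exact lt_irrefl _ hr)
      · intro eid
        rw [him p.1 eid]
        constructor
        · intro hm
          rcases List.mem_map.mp hm with ⟨q, hq, rfl⟩
          exact ⟨(p.1, q.1, q.2), (hKT _).mpr ((pvKept_line (pvCounts tc) tc hp q.1 q.2).mpr hq), rfl, rfl⟩
        · rintro ⟨t, ht, hfst, rfl⟩
          have ht' := (hKT t).mp ht
          have : (t.2.1, t.2.2) ∈ pvLineKept (pvCounts tc) p := by
            rw [← pvKept_line (pvCounts tc) tc hp, ← hfst]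
            simpa using ht'
          exact List.mem_map.mpr ⟨(t.2.1, t.2.2), this, rfl⟩
    · exact pvLineKept_fst_pairwise (pvCounts tc) p
  rw [hinner, List.map_map]
  apply List.map_congr_left
  intro q hq
  simp only [Function.comp_def]
  refine congrArg _ ?_
  have hk : (p.1, q.1, q.2) ∈ pvKeptTriples (pvIdlists tc).items :=
    (hKT _).mpr ((pvKept_line (pvCounts tc) tc hp q.1 q.2).mpr hq)
  have := hlk _ hk
  simp only at this
  rw [PySem.Dict.getD_eq_get?_getD, this]
  rfl

-- ===== VERDICT (by name: the statement is the Claim_ definition above) =====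
theorem createSpadeDatabase_spec : Claim_equal_createSpadeDatabase := by
  intro textCorpus _
  unfold Spec_createSpadeDatabase
  rw [pvA_eq, pvSpec_bridge, pvB_eq]
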